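-- pv_equiv track=rewrite | github.com/Xeranes-arch/Python | ex4/tictactoe/src/ttt/tictactoe.py | position_to_coordinates
-- ===== SOURCE A (Python) =====
-- def position_to_coordinates(position):
--     """helper function: converts a given position (1 - 9) to coordinates (row, col) on the grid"""
--     col = position % 3 - 1
--     n = 1
--     while position > 3:
--         position = position - 3
--         n = n + 1
--     row = n - 1
--     return ((row, col))
-- ===== SOURCE B (Python) =====
-- def position_to_coordinates(position):
--     """helper function: converts a given position (1 - 9) to coordinates (row, col) on the grid"""
--     return ((position - 1) // 3, position % 3 - 1)
-- ===== Notes on version B (the rewrite author's own statement) =====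
-- stated objective: simpler
-- what changed: Replaces the while-loop that repeatedly subtracts 3 to count the row with the closed-form floor division (position - 1) // 3, returned as a one-line tuple with the unchanged column formula.
-- intended difference: For position <= 0 (outside the documented 1-9 range) A's loop never runs and it returns row 0 regardless, while B returns the arithmetically consistent row (position - 1) // 3; B's value is the natural extension of the 1-9 mapping. — e.g. on position_to_coordinates(0): A returns (0, -1), B returns (-1, -1)
import Mathlib
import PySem

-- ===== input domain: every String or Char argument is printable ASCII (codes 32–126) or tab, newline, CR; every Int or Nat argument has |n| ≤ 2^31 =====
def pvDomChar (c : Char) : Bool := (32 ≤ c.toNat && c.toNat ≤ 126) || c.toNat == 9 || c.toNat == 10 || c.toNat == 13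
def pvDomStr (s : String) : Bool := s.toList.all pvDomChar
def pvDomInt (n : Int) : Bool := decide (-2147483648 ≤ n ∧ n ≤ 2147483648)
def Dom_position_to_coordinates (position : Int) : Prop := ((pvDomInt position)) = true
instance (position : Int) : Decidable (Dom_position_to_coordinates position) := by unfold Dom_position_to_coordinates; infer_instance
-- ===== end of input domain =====

-- B replaces A's counting while-loop with the closed form (position-1)//3; equal on all
-- position ≥ 1, with a stated intended difference for position ≤ 0.

-- ===== PORT A =====
-- the while loop: while position > 3: position -= 3; n += 1; returns final n
def pvLoopA (position n : Int) : Int :=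
  if position > 3 then pvLoopA (position - 3) (n + 1) else n
termination_by position.toNat
decreasing_by omega

def position_to_coordinates (position : Int) : Int × Int :=
  let col := PySem.Int.mod position 3 - 1
  let n := pvLoopA position 1
  let row := n - 1
  (row, col)

-- ===== PORT B =====
def position_to_coordinates_alt (position : Int) : Int × Int :=
  (PySem.Int.floordiv (position - 1) 3, PySem.Int.mod position 3 - 1)

-- ===== PRECONDITION & SPEC =====
-- For position ≤ 0 (outside the documented 1-9 range) A's loop never runs and it returns row 0
-- regardless, while B returns the arithmetically consistent row (position-1)//3; B's value is
-- the natural extension of the 1-9 mapping.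
def D_position_to_coordinates (position : Int) : Prop := position ≤ 0
instance (position : Int) : Decidable (D_position_to_coordinates position) := by unfold D_position_to_coordinates; infer_instance

def Spec_position_to_coordinates (position : Int) (out : Int × Int) : Prop :=
  ¬ D_position_to_coordinates position → out = position_to_coordinates_alt position
instance (position : Int) (out : Int × Int) : Decidable (Spec_position_to_coordinates position out) := by unfold Spec_position_to_coordinates; infer_instance

def pvDiffWitness_position_to_coordinates : Int := 0
def pvDiffWitnessOut_position_to_coordinates : (Int × Int) × (Int × Int) := ((0, -1), (-1, -1))

-- ===== CLAIM =====
def Claim_unchanged_position_to_coordinates : Prop := ∀ (position : Int), Dom_position_to_coordinates position → Spec_position_to_coordinates position (position_to_coordinates position)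
def Claim_changed_position_to_coordinates : Prop := Dom_position_to_coordinates (pvDiffWitness_position_to_coordinates) ∧ D_position_to_coordinates (pvDiffWitness_position_to_coordinates) ∧ position_to_coordinates (pvDiffWitness_position_to_coordinates) = pvDiffWitnessOut_position_to_coordinates.1 ∧ position_to_coordinates_alt (pvDiffWitness_position_to_coordinates) = pvDiffWitnessOut_position_to_coordinates.2 ∧ pvDiffWitnessOut_position_to_coordinates.1 ≠ pvDiffWitnessOut_position_to_coordinates.2
def Claim_exact_position_to_coordinates : Prop := ∀ (position : Int), Dom_position_to_coordinates position → D_position_to_coordinates position → position_to_coordinates position ≠ position_to_coordinates_alt position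

-- ===== LEMMAS AND PROOFS =====
theorem pvLoopA_eq (position n : Int) :
    pvLoopA position n = n + max 0 ((position - 1) / 3) := by
  induction position, n using pvLoopA.induct with
  | case1 p n h ih =>
      rw [pvLoopA, if_pos h, ih]
      omega
  | case2 p n h =>
      rw [pvLoopA, if_neg h]
      omega

theorem position_to_coordinates_spec : Claim_unchanged_position_to_coordinates := by
  intro position _ hD
  unfold D_position_to_coordinates at hD
  unfold position_to_coordinates position_to_coordinates_alt
  simp only [pvLoopA_eq, Prod.mk.injEq,
    PySem.Int.floordiv_eq_ediv_of_pos (show (0:Int) < 3 by omega)]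
  exact ⟨by omega, trivial⟩

theorem position_to_coordinates_changed : Claim_changed_position_to_coordinates := by
  unfold Claim_changed_position_to_coordinates
  refine ⟨by decide, by decide, ?_, by decide, by decide⟩
  simp only [position_to_coordinates, pvDiffWitness_position_to_coordinates,
    pvDiffWitnessOut_position_to_coordinates, pvLoopA_eq]
  decide

theorem position_to_coordinates_tight : Claim_exact_position_to_coordinates := by
  intro position _ hD
  unfold D_position_to_coordinates at hD
  unfold position_to_coordinates position_to_coordinates_alt
  simp only [pvLoopA_eq, Prod.mk.injEq, ne_eq, not_and,
    PySem.Int.floordiv_eq_ediv_of_pos (show (0:Int) < 3 by omega)]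
  intro h
  omega
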